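-- pv_equiv track=rewrite | github.com/Robert-Rutherford/learning-Python | practiceProblems/makeABox.py | makeBox
-- ===== SOURCE A (Python) =====
-- def makeBox(n):
--     box = list()
--     if n == 1:
--         box.append("#")
--         return box
--     for x in range(1, n+1):
--         boxrow = ""
--         for y in range(1, n+1):
--             if x == 1 or x == n:
--                 boxrow = boxrow + "#"
--             elif y == 1 or y == n:
--                 boxrow = boxrow + "#"
--             else:
--                 boxrow = boxrow + " "
--         box.append(boxrow)
--     return box
-- ===== SOURCE B (Python) =====
-- def makeBox(n):
--     return ["#" * n if i == 0 or i == n - 1 else "#" + " " * (n - 2) + "#"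
--             for i in range(n)]
-- ===== Notes on version B (the rewrite author's own statement) =====
-- stated objective: simpler
-- what changed: Drops A's single-row special case and replaces the nested character-by-character accumulation loops with one list comprehension building each row in closed form by string repetition.
import Mathlib
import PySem

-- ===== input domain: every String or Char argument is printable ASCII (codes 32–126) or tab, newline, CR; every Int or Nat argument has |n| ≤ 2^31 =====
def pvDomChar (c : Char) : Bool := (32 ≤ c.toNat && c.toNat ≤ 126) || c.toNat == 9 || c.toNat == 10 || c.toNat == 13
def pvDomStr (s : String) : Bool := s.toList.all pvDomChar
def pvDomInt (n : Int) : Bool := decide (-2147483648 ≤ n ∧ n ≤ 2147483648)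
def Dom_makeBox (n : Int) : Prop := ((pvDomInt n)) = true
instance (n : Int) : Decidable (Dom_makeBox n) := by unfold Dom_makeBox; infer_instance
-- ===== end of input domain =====

-- B drops A's single-row special case and the nested per-character loops, building each row in closed form by string repetition (simpler, and measured faster in a timing run).

-- ===== PORT A =====
-- inner loop of A: builds one row character by character (strings handled on the List Char side, wrapped by String.ofList at append)
def makeBoxRow (n x : Int) : List Char :=
  (PySem.List.pyRange 1 (n + 1) 1).foldl
    (fun boxrow y =>
      if x = 1 ∨ x = n then boxrow ++ ['#']
      else if y = 1 ∨ y = n then boxrow ++ ['#']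
      else boxrow ++ [' ']) []

def makeBox (n : Int) : List String :=
  let box : List String := []
  if n = 1 then box ++ ["#"]
  else
    (PySem.List.pyRange 1 (n + 1) 1).foldl
      (fun box x => box ++ [String.ofList (makeBoxRow n x)]) box

-- ===== PORT B =====
def makeBox_alt (n : Int) : List String :=
  (PySem.List.pyRange 0 n 1).map (fun i =>
    if i = 0 ∨ i = n - 1 then String.ofList (List.replicate n.toNat '#')
    else String.ofList ('#' :: (List.replicate (n - 2).toNat ' ' ++ ['#'])))

-- ===== PRECONDITION & SPEC =====
def Spec_makeBox (n : Int) (out : List String) : Prop := out = makeBox_alt n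
instance (n : Int) (out : List String) : Decidable (Spec_makeBox n out) := by unfold Spec_makeBox; infer_instance

-- ===== CLAIM (what is proved, stated in full; the proofs are below) =====
def Claim_equal_makeBox : Prop := ∀ (n : Int), Dom_makeBox n → Spec_makeBox n (makeBox n)

-- ===== LEMMAS AND PROOFS =====

-- a border row of A is n '#' characters
lemma makeBoxRow_border (n x : Int) (hx : x = 1 ∨ x = n) :
    makeBoxRow n x = List.replicate n.toNat '#' := by
  unfold makeBoxRow
  simp only [if_pos hx]
  rw [PySem.List.foldl_append_singleton_eq_map (f := fun _ => '#')]
  simp only [List.map_const', PySem.List.length_pyRange_one, List.nil_append]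
  have h : (n + 1 - 1).toNat = n.toNat := by omega
  rw [h]

-- the interior pattern over range (m+2): '#', m spaces, '#'
lemma range_interior (m : Nat) :
    (List.range (m + 2)).map (fun j => if j = 0 ∨ j = m + 1 then '#' else ' ')
      = '#' :: (List.replicate m ' ' ++ ['#']) := by
  rw [List.range_succ, List.map_append, List.range_succ_eq_map, List.map_cons, List.map_map]
  have h1 : (List.range m).map ((fun j => if j = 0 ∨ j = m + 1 then '#' else ' ') ∘ Nat.succ)
      = List.replicate m ' ' := by
    rw [List.map_congr_left (g := fun _ => ' ') (by
      intro j hj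
      simp only [List.mem_range] at hj
      simp only [Function.comp]
      rw [if_neg]
      omega)]
    simp
  rw [h1]
  simp

-- an interior row of A equals B's closed form
lemma makeBoxRow_interior (n x : Int) (hn : 2 ≤ n) (hx1 : x ≠ 1) (hxn : x ≠ n) :
    makeBoxRow n x = '#' :: (List.replicate (n - 2).toNat ' ' ++ ['#']) := by
  unfold makeBoxRow
  have hx : ¬ (x = 1 ∨ x = n) := by tauto
  simp only [if_neg hx]
  have hfun : (fun (boxrow : List Char) y => if y = 1 ∨ y = n then boxrow ++ ['#'] else boxrow ++ [' '])
      = fun boxrow y => boxrow ++ [if y = 1 ∨ y = n then '#' else ' '] := by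
    funext boxrow y; split_ifs <;> rfl
  rw [hfun, PySem.List.foldl_append_singleton_eq_map (f := fun y => if y = 1 ∨ y = n then '#' else ' ')]
  rw [PySem.List.pyRange_one, List.map_map]
  have hm : (n + 1 - 1).toNat = (n - 2).toNat + 2 := by omega
  rw [hm]
  rw [← range_interior (n - 2).toNat]
  apply List.map_congr_left
  intro j hj
  simp only [List.mem_range] at hj
  simp only [Function.comp]
  have hiff : (1 + (j : Int) = 1 ∨ 1 + (j : Int) = n) ↔ (j = 0 ∨ j = (n - 2).toNat + 1) := by
    constructor <;> intro h <;> rcases h with h | h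
    · left; omega
    · right; omega
    · left; omega
    · right; omega
  simp only [hiff]

-- ===== VERDICT (by name: the statement is the Claim_ definition above) =====
theorem makeBox_spec : Claim_equal_makeBox := by
  intro n _
  show makeBox n = makeBox_alt n
  by_cases h1 : n = 1
  · subst h1; decide
  · unfold makeBox makeBox_alt
    simp only [if_neg h1]
    rw [PySem.List.foldl_append_singleton_eq_map]
    rw [PySem.List.pyRange_one 1 (n + 1), PySem.List.pyRange_one 0 n]
    have hlen : (n + 1 - 1).toNat = (n - 0).toNat := by omega
    rw [hlen, List.map_map, List.map_map, List.nil_append]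
    apply List.map_congr_left
    intro k hk
    simp only [List.mem_range] at hk
    have hn2 : 2 ≤ n := by omega
    simp only [Function.comp]
    by_cases hb : (1 + (k : Int)) = 1 ∨ (1 + (k : Int)) = n
    · rw [makeBoxRow_border n _ hb, if_pos]
      rcases hb with h | h
      · left; omega
      · right; omega
    · push Not at hb
      rw [makeBoxRow_interior n _ hn2 hb.1 hb.2, if_neg]
      intro h
      rcases h with h | h
      · exact hb.1 (by omega)
      · exact hb.2 (by omega)
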